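-- pv_equiv track=rewrite | github.com/marcelucakar/Programiranje1 | naloge/naloga5/testi.py | popravi
-- ===== SOURCE A (Python) =====
-- def popravi(kodirnik):
--     popravki = {
--         'Murska Sobota Rakican': 'Murska Sobota',
--         'Crnomelj Doblice': 'Črnomelj',
--         'Letalisce Edvarda Rusjana Mari': 'Maribor',
--         'Letalisce Jozeta Pucnika Ljubl': 'Brnik',
--         'Ljubljana Bezigrad': 'Ljubljana',
--         'Kocevje': 'Kočevje',
--         'Smartno Pri Slovenj Gradcu': 'Smartno pri Slovenj Gradcu',
--         'Kredarica': 'Kredarica',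
--         'Veliki Dolenci': 'Veliki Dolenci',
--         'Novo Mesto': 'Novo mesto',
--         'Nova Vas Na Blokah': 'Bloke',
--         'Celje Medlog': 'Celje',
--         'Portoroz Letalisce': 'Portorož',
--         'Topol Pri Medvodah': 'Topol pri Medvodah',
--         'Ratece Planica': 'Rateče'
--     }
--     for stari in list(kodirnik.keys()):
--         if stari in popravki:
--             nov = popravki[stari]
--             kodirnik[nov] = kodirnik.pop(stari)
--     return kodirnik
-- ===== SOURCE B (Python) =====
-- def popravi(kodirnik):
--     popravki = {
--         'Murska Sobota Rakican': 'Murska Sobota',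
--         'Crnomelj Doblice': 'Črnomelj',
--         'Letalisce Edvarda Rusjana Mari': 'Maribor',
--         'Letalisce Jozeta Pucnika Ljubl': 'Brnik',
--         'Ljubljana Bezigrad': 'Ljubljana',
--         'Kocevje': 'Kočevje',
--         'Smartno Pri Slovenj Gradcu': 'Smartno pri Slovenj Gradcu',
--         'Kredarica': 'Kredarica',
--         'Veliki Dolenci': 'Veliki Dolenci',
--         'Novo Mesto': 'Novo mesto',
--         'Nova Vas Na Blokah': 'Bloke',
--         'Celje Medlog': 'Celje',
--         'Portoroz Letalisce': 'Portorož',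
--         'Topol Pri Medvodah': 'Topol pri Medvodah',
--         'Ratece Planica': 'Rateče'
--     }
--     # Single pass partition: kept entries keep their order, renamed entries are
--     # collected and appended afterwards (overwriting an existing key in place),
--     # exactly dict.pop + reinsert semantics. Returns a fresh dict (no mutation).
--     obdrzani = {}
--     preimenovani = []
--     for stari, vrednost in kodirnik.items():
--         nov = popravki.get(stari)
--         if nov is None:
--             obdrzani[stari] = vrednost
--         else:
--             preimenovani.append((nov, vrednost))
--     obdrzani.update(preimenovani)
--     return obdrzani
-- ===== Notes on version B (the rewrite author's own statement) =====
-- stated objective: alternative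
-- what changed: Instead of mutating the dict during a scan of its key snapshot (pop + reinsert per corrected key), B partitions the entries in one pass into kept entries and renamed pairs, builds a fresh dict from the kept entries and appends the renamed pairs with one update; it returns a new dict rather than mutating the argument.
import Mathlib
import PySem

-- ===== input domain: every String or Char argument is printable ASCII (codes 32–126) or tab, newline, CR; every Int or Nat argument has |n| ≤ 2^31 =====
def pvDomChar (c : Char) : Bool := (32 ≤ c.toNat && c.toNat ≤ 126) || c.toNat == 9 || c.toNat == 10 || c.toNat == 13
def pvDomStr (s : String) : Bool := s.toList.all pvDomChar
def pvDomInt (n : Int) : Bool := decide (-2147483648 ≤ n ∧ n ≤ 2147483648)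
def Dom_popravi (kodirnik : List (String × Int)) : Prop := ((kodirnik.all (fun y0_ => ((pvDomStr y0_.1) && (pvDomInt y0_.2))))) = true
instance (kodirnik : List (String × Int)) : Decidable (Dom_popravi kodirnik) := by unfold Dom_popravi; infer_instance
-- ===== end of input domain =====

-- B partitions the entries in one pass (kept entries / renamed pairs) and builds the result as a
-- fresh dict instead of A's pop-and-reinsert scan; return-value equivalence only is proved
-- (A mutates and returns its argument, B returns a new dict).

-- the literal `popravki` table (identical in both Pythons)
def pvPopravki : List (String × String) := [
  ("Murska Sobota Rakican", "Murska Sobota"),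
  ("Crnomelj Doblice", "Črnomelj"),
  ("Letalisce Edvarda Rusjana Mari", "Maribor"),
  ("Letalisce Jozeta Pucnika Ljubl", "Brnik"),
  ("Ljubljana Bezigrad", "Ljubljana"),
  ("Kocevje", "Kočevje"),
  ("Smartno Pri Slovenj Gradcu", "Smartno pri Slovenj Gradcu"),
  ("Kredarica", "Kredarica"),
  ("Veliki Dolenci", "Veliki Dolenci"),
  ("Novo Mesto", "Novo mesto"),
  ("Nova Vas Na Blokah", "Bloke"),
  ("Celje Medlog", "Celje"),
  ("Portoroz Letalisce", "Portorož"),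
  ("Topol Pri Medvodah", "Topol pri Medvodah"),
  ("Ratece Planica", "Rateče")]

def pvTabela : PySem.Dict String String := PySem.Dict.mk pvPopravki

-- ===== PORT A =====
-- loop body of A: `if stari in popravki: nov = popravki[stari]; kodirnik[nov] = kodirnik.pop(stari)`
def pvStepA (d : PySem.Dict String Int) (stari : String) : PySem.Dict String Int :=
  if pvTabela.contains stari then
    match pvTabela.get? stari with
    | some nov =>
      match d.get? stari with
      | some v => (d.erase stari).insert nov v
      | none => d   -- kodirnik.pop(stari) would raise KeyError; unreachable when the key list is duplicate-free (Pre_)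
    | none => d     -- unreachable: contains stari = true
  else d

def popravi (kodirnik : List (String × Int)) : List (String × Int) :=
  (((PySem.Dict.mk kodirnik).keys).foldl pvStepA (PySem.Dict.mk kodirnik)).items

-- ===== PORT B =====
-- loop body of B: `nov = popravki.get(stari); if nov is None: obdrzani[stari] = v else: preimenovani.append((nov, v))`
def pvStepB (acc : PySem.Dict String Int × List (String × Int)) (p : String × Int) :
    PySem.Dict String Int × List (String × Int) :=
  match pvTabela.get? p.1 with
  | none => (acc.1.insert p.1 p.2, acc.2)
  | some nov => (acc.1, acc.2 ++ [(nov, p.2)])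

def popravi_alt (kodirnik : List (String × Int)) : List (String × Int) :=
  let acc := ((PySem.Dict.mk kodirnik).items).foldl pvStepB (PySem.Dict.empty, [])
  (acc.1.update acc.2).items

-- ===== PRECONDITION & SPEC =====
-- Pre_ excludes association lists with duplicate keys only: they represent no Python dict, so
-- neither Python ever receives them.
def Pre_popravi (kodirnik : List (String × Int)) : Prop := (kodirnik.map Prod.fst).Nodup

instance (kodirnik : List (String × Int)) : Decidable (Pre_popravi kodirnik) := by
  unfold Pre_popravi; infer_instance

def pvWitness_popravi : (List (String × Int)) := [("Kocevje", 3), ("Postojna", 5)]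

def Spec_popravi (kodirnik : List (String × Int)) (out : List (String × Int)) : Prop := out = popravi_alt kodirnik
instance (kodirnik : List (String × Int)) (out : List (String × Int)) : Decidable (Spec_popravi kodirnik out) := by unfold Spec_popravi; infer_instance

-- ===== CLAIM (what is proved, stated in full; the proofs are below) =====
def Claim_equal_popravi : Prop := ∀ (kodirnik : List (String × Int)), Dom_popravi kodirnik → Pre_popravi kodirnik → Spec_popravi kodirnik (popravi kodirnik)

-- ===== LEMMAS AND PROOFS =====

-- proof-side vocabulary: the kept entries, the renamed pairs, and insertion of one pair
def pvKeep (l : List (String × Int)) : List (String × Int) :=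
  l.filter (fun p => !pvTabela.contains p.1)

def pvRen (l : List (String × Int)) : List (String × Int) :=
  l.filterMap (fun p => (pvTabela.get? p.1).map (fun nov => (nov, p.2)))

def pvIns (d : PySem.Dict String Int) (p : String × Int) : PySem.Dict String Int :=
  d.insert p.1 p.2

-- a correction value that is itself a correction key names the same station (checked on the 15 entries)
theorem pvTabela_value_key :
    ∀ p ∈ pvPopravki, pvTabela.contains p.2 = true → p.2 = p.1 := by decide

theorem pvGet?_isSome_of_contains {κ ν : Type} [BEq κ] [LawfulBEq κ]
    (d : PySem.Dict κ ν) (x : κ) (h : d.contains x = true) : ∃ v, d.get? x = some v := by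
  simp only [PySem.Dict.contains, List.any_eq_true] at h
  obtain ⟨p, hp, hpx⟩ := h
  simp only [PySem.Dict.get?]
  have : (d.items.find? (fun q => q.1 == x)).isSome := List.find?_isSome.mpr ⟨p, hp, hpx⟩
  obtain ⟨q, hq⟩ := Option.isSome_iff_exists.mp this
  exact ⟨q.2, by simp [hq]⟩

-- erase commutes with an insert at a different key
theorem pvErase_insert {κ ν : Type} [BEq κ] [LawfulBEq κ]
    (d : PySem.Dict κ ν) (a : κ) (b : ν) (s : κ) (hne : a ≠ s) :
    (d.insert a b).erase s = (d.erase s).insert a b := by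
  apply PySem.Dict.ext
  by_cases h : d.contains a = true
  · have h' : (d.erase s).contains a = true := by
      simp only [PySem.Dict.contains, PySem.Dict.erase, List.any_eq_true] at h ⊢
      obtain ⟨p, hp, hpa⟩ := h
      refine ⟨p, List.mem_filter.mpr ⟨hp, ?_⟩, hpa⟩
      have : p.1 = a := by simpa using hpa
      simp [this, hne]
    simp only [PySem.Dict.erase] at h'
    simp only [PySem.Dict.insert, PySem.Dict.erase, h, h', if_true]
    rw [List.filter_map]
    refine congrArg (List.map _) (List.filter_congr ?_)
    intro p _
    by_cases hpa : p.1 = a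
    · simp [Function.comp, hpa]
    · simp [Function.comp, hpa]
  · have hf : d.contains a = false := by simpa using h
    have h' : (d.erase s).contains a = false := by
      simp only [PySem.Dict.contains, PySem.Dict.erase, List.any_eq_false] at hf ⊢
      intro p hp
      exact hf p (List.mem_of_mem_filter hp)
    simp only [PySem.Dict.erase] at h'
    simp only [PySem.Dict.insert, PySem.Dict.erase, hf, h']
    simp [List.filter_append, hne]

-- a fold of inserts over keys not containing s: get? at s and erase at s pass through
theorem pvGet?_foldIns (r : List (String × Int)) (d : PySem.Dict String Int) (s : String)
    (h : s ∉ r.map Prod.fst) : (r.foldl pvIns d).get? s = d.get? s := by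
  induction r generalizing d with
  | nil => rfl
  | cons p t ih =>
    simp only [List.map_cons, List.mem_cons, not_or] at h
    rw [List.foldl_cons, ih _ (h.2)]
    exact PySem.Dict.get?_insert_of_ne d p.2 h.1

theorem pvErase_foldIns (r : List (String × Int)) (d : PySem.Dict String Int) (s : String)
    (h : s ∉ r.map Prod.fst) : (r.foldl pvIns d).erase s = r.foldl pvIns (d.erase s) := by
  induction r generalizing d with
  | nil => rfl
  | cons p t ih =>
    simp only [List.map_cons, List.mem_cons, not_or] at h
    rw [List.foldl_cons, List.foldl_cons, ih _ h.2]
    show List.foldl pvIns ((d.insert p.1 p.2).erase s) t = _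
    rw [pvErase_insert d p.1 p.2 s (Ne.symm h.1)]
    rfl

-- the key being processed is not among the keys renamed so far
theorem pvNot_mem_ren (done : List (String × Int)) (s : String)
    (hc : pvTabela.contains s = true) (hnd : s ∉ done.map Prod.fst) :
    s ∉ (pvRen done).map Prod.fst := by
  intro hmem
  simp only [pvRen, List.map_filterMap, List.mem_filterMap] at hmem
  obtain ⟨p, hp, hval⟩ := hmem
  match hget : pvTabela.get? p.1 with
  | none => simp [hget] at hval
  | some nov =>
    simp only [hget, Option.map_some] at hval
    have hnovs : nov = s := by simpa using hval
    have hmemtab : (p.1, nov) ∈ pvPopravki := PySem.Dict.mem_items_of_get?_eq_some pvTabela hget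
    have hkey : (p.1, nov).2 = (p.1, nov).1 :=
      pvTabela_value_key (p.1, nov) hmemtab (by simpa [hnovs] using hc)
    have hps : p.1 = s := by simpa [hnovs] using hkey.symm
    exact hnd (hps ▸ List.mem_map_of_mem hp)

-- removing the currently processed entry from the underlying list
theorem pvFilter_middle (X Y : List (String × Int)) (p : String × Int)
    (hX : p.1 ∉ X.map Prod.fst) (hY : p.1 ∉ Y.map Prod.fst) :
    (X ++ p :: Y).filter (fun q => !(q.1 == p.1)) = X ++ Y := by
  rw [List.filter_append, List.filter_cons]
  have hp : (!(p.1 == p.1)) = false := by simp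
  rw [hp]
  have fX : X.filter (fun q => !(q.1 == p.1)) = X := by
    rw [List.filter_eq_self]
    intro q hq
    have : q.1 ≠ p.1 := fun h => hX (h ▸ List.mem_map_of_mem hq)
    simpa using this
  have fY : Y.filter (fun q => !(q.1 == p.1)) = Y := by
    rw [List.filter_eq_self]
    intro q hq
    have : q.1 ≠ p.1 := fun h => hY (h ▸ List.mem_map_of_mem hq)
    simpa using this
  simp [fX, fY]

-- ===== A-side loop invariant =====
theorem pvA_loop (todo done : List (String × Int))
    (hnd : ((done ++ todo).map Prod.fst).Nodup) :
    (todo.map Prod.fst).foldl pvStepA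
        ((pvRen done).foldl pvIns (PySem.Dict.mk (pvKeep done ++ todo)))
      = (pvRen (done ++ todo)).foldl pvIns (PySem.Dict.mk (pvKeep (done ++ todo))) := by
  induction todo generalizing done with
  | nil => simp
  | cons p rest ih =>
    have hassoc : done ++ p :: rest = (done ++ [p]) ++ rest := by simp
    have hnd' : (((done ++ [p]) ++ rest).map Prod.fst).Nodup := by rwa [← hassoc]
    -- key facts from Nodup
    have hndl : ((done ++ p :: rest).map Prod.fst).Nodup := hnd
    have hsdone : p.1 ∉ done.map Prod.fst := by
      simp only [List.map_append, List.nodup_append] at hndl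
      intro hc
      exact hndl.2.2 p.1 hc p.1 (by simp) rfl
    have hsrest : p.1 ∉ rest.map Prod.fst := by
      simp only [List.map_append, List.nodup_append, List.map_cons, List.nodup_cons] at hndl
      exact hndl.2.1.1
    have hkeepsub : List.Sublist (pvKeep done ++ p :: rest) (done ++ p :: rest) :=
      List.Sublist.append (List.filter_sublist) (List.Sublist.refl _)
    have hndkeep : ((pvKeep done ++ p :: rest).map Prod.fst).Nodup :=
      List.Nodup.sublist (List.Sublist.map Prod.fst hkeepsub) hndl
    have hskeep : p.1 ∉ (pvKeep done).map Prod.fst := fun hc =>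
      hsdone (List.mem_map.mpr (by
        obtain ⟨q, hq, hq1⟩ := List.mem_map.mp hc
        exact ⟨q, List.mem_of_mem_filter hq, hq1⟩))
    rw [List.map_cons, List.foldl_cons]
    by_cases hc : pvTabela.contains p.1 = true
    · -- corrected key: pop + reinsert
      obtain ⟨nov, hnov⟩ := pvGet?_isSome_of_contains pvTabela p.1 hc
      have hrenmem : p.1 ∉ (pvRen done).map Prod.fst := pvNot_mem_ren done p.1 hc hsdone
      have hbaseget : (PySem.Dict.mk (pvKeep done ++ p :: rest)).get? p.1 = some p.2 := by
        apply PySem.Dict.get?_of_mem_items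
        · simp
        · simpa [PySem.Dict.keys] using hndkeep
      have hget : ((pvRen done).foldl pvIns (PySem.Dict.mk (pvKeep done ++ p :: rest))).get? p.1
          = some p.2 := by rw [pvGet?_foldIns _ _ _ hrenmem, hbaseget]
      have hstep : pvStepA ((pvRen done).foldl pvIns (PySem.Dict.mk (pvKeep done ++ p :: rest))) p.1
          = (pvRen (done ++ [p])).foldl pvIns (PySem.Dict.mk (pvKeep (done ++ [p]) ++ rest)) := by
        simp only [pvStepA, hc, if_pos, hnov, hget]
        rw [pvErase_foldIns _ _ _ hrenmem]
        have herase : (PySem.Dict.mk (pvKeep done ++ p :: rest)).erase p.1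
            = PySem.Dict.mk (pvKeep done ++ rest) := by
          simp only [PySem.Dict.erase]
          exact congrArg PySem.Dict.mk (pvFilter_middle _ _ p hskeep hsrest)
        rw [herase]
        have hkeepstep : pvKeep (done ++ [p]) = pvKeep done := by
          simp [pvKeep, List.filter_append, hc]
        have hrenstep : pvRen (done ++ [p]) = pvRen done ++ [(nov, p.2)] := by
          simp [pvRen, List.filterMap_append, hnov]
        rw [hkeepstep, hrenstep, List.foldl_append]
        rfl
      rw [hstep, ih (done ++ [p]) hnd', ← hassoc]
    · -- uncorrected key: the step is the identity and the entry stays kept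
      have hcf : pvTabela.contains p.1 = false := by simpa using hc
      have hstep : ∀ d, pvStepA d p.1 = d := fun d => by simp [pvStepA, hcf]
      rw [hstep]
      have hkeepstep : pvKeep (done ++ [p]) ++ rest = pvKeep done ++ p :: rest := by
        simp [pvKeep, List.filter_append, hcf]
      have hrenstep : pvRen (done ++ [p]) = pvRen done := by
        simp [pvRen, List.filterMap_append, hcf, PySem.Dict.get?_eq_none_iff_contains]
      have := ih (done ++ [p]) hnd'
      rw [hkeepstep, hrenstep] at this
      rw [this, ← hassoc]

-- ===== B-side loop characterisation =====
theorem pvB_loop (l : List (String × Int)) (d : PySem.Dict String Int)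
    (r : List (String × Int)) :
    l.foldl pvStepB (d, r) = ((pvKeep l).foldl pvIns d, r ++ pvRen l) := by
  induction l generalizing d r with
  | nil => simp [pvKeep, pvRen]
  | cons p t ih =>
    rw [List.foldl_cons]
    match hget : pvTabela.get? p.1 with
    | none =>
      have hcf : pvTabela.contains p.1 = false :=
        (PySem.Dict.get?_eq_none_iff_contains pvTabela p.1).mp hget
      simp only [pvStepB, hget]
      rw [ih]
      simp [pvKeep, pvRen, hcf, hget, pvIns]
    | some nov =>
      have hct : pvTabela.contains p.1 = true := by
        cases hcc : pvTabela.contains p.1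
        · have := (PySem.Dict.get?_eq_none_iff_contains pvTabela p.1).mpr hcc
          rw [this] at hget
          exact absurd hget (by simp)
        · rfl
      simp only [pvStepB, hget]
      rw [ih]
      simp [pvKeep, pvRen, hct, hget]

-- building a dict by inserting entries with fresh distinct keys is Dict.mk
theorem pvFoldIns_empty (l : List (String × Int)) (hnd : (l.map Prod.fst).Nodup) :
    l.foldl pvIns PySem.Dict.empty = PySem.Dict.mk l := by
  apply PySem.Dict.ext
  have := PySem.Dict.items_foldl_insert_fresh l Prod.fst Prod.snd
    (PySem.Dict.empty : PySem.Dict String Int)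
    (fun a _ => by simp [PySem.Dict.contains_empty]) hnd
  simpa [pvIns] using this

-- ===== VERDICT =====
theorem popravi_spec : Claim_equal_popravi := by
  unfold Claim_equal_popravi Spec_popravi
  intro k _ hpre
  unfold popravi popravi_alt
  have hkeys : (PySem.Dict.mk k).keys = k.map Prod.fst := rfl
  have hitems : (PySem.Dict.mk k).items = k := rfl
  rw [hkeys, hitems]
  -- B side
  rw [pvB_loop k PySem.Dict.empty []]
  simp only [List.nil_append, PySem.Dict.update]
  have hndkeep : ((pvKeep k).map Prod.fst).Nodup :=
    List.Nodup.sublist (List.Sublist.map Prod.fst List.filter_sublist) hpre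
  rw [pvFoldIns_empty _ hndkeep]
  -- A side via the loop invariant with done = [] (pvRen [] = [], pvKeep [] ++ k = k by rfl)
  have hA : List.foldl pvStepA (PySem.Dict.mk k) (List.map Prod.fst k)
      = List.foldl pvIns (PySem.Dict.mk (pvKeep k)) (pvRen k) :=
    pvA_loop k [] (by simpa using hpre)
  rw [hA]
  rfl
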